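-- pv_equiv track=rewrite | github.com/banban-jpg/algorithm | 백준/Silver/1920. 수 찾기/수 찾기.py | finalanswer
-- ===== SOURCE A (Python) =====
-- def finalanswer(li1, li2):
--     # li2를 집합으로 변환하여 빠른 검색을 가능하게 합니다.
--     set_li1 = set(li1)
--
--     # 결과를 저장할 리스트 생성
--     li3 = []
--
--     # li1의 각 요소를 순회
--     for item in li2:
--         # item이 set_li2에 존재하면 1, 그렇지 않으면 0을 추가합니다.
--         if item in set_li1:
--             li3.append(1)
--         else:
--             li3.append(0)
--
--     return li3
-- ===== SOURCE B (Python) =====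
-- def _bisect_left(arr, x):
--     lo, hi = 0, len(arr)
--     while lo < hi:
--         mid = (lo + hi) // 2
--         if arr[mid] < x:
--             lo = mid + 1
--         else:
--             hi = mid
--     return lo
--
--
-- def finalanswer(li1, li2):
--     arr = sorted(li1)
--     res = []
--     for item in li2:
--         i = _bisect_left(arr, item)
--         res.append(1 if i < len(arr) and arr[i] == item else 0)
--     return res
-- ===== Notes on version B (the rewrite author's own statement) =====
-- stated objective: alternative
-- what changed: Replaces the hash-set membership test by a sorted copy of li1 built once and a hand-written binary search (bisect_left) per query, checking arr[i] == item.
import Mathlib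
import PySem

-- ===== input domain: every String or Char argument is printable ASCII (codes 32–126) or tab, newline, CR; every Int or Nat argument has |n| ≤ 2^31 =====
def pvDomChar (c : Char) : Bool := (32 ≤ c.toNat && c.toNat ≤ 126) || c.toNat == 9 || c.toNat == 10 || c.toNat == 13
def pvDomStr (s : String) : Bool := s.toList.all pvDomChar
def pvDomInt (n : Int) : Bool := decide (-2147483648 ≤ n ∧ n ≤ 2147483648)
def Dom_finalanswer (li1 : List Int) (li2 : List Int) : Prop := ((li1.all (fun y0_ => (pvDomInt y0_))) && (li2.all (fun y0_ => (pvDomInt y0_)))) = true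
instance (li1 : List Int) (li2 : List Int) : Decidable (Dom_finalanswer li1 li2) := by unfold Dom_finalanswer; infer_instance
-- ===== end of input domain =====

-- B replaces A's hash-set membership test by a sorted copy of li1 plus a hand-written
-- binary search per query (objective: alternative; same values, different lookup mechanism).

-- ===== PORT A =====
def finalanswer (li1 : List Int) (li2 : List Int) : List Int :=
  let set_li1 := PySem.Set.ofList li1
  li2.foldl (fun li3 item => li3 ++ [if item ∈ set_li1 then (1 : Int) else 0]) []

-- ===== PORT B =====
-- hand-written bisect_left from Source B: lo/hi loop, mid = (lo+hi)//2 (nonnegative, so Nat division is exact)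
def pvBlAux (arr : List Int) (x : Int) (lo hi : Nat) : Nat :=
  if h : lo < hi then
    let mid := (lo + hi) / 2
    if arr.getD mid 0 < x then pvBlAux arr x (mid + 1) hi else pvBlAux arr x lo mid
  else lo
termination_by hi - lo
decreasing_by all_goals omega

def pvBisectLeft (arr : List Int) (x : Int) : Nat := pvBlAux arr x 0 arr.length

def finalanswer_alt (li1 : List Int) (li2 : List Int) : List Int :=
  let arr := PySem.List.sorted li1 (fun v => v) false
  li2.foldl (fun res item =>
    let i := pvBisectLeft arr item
    res ++ [if i < arr.length ∧ arr.getD i 0 = item then (1 : Int) else 0]) []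

-- ===== PRECONDITION & SPEC =====
def Spec_finalanswer (li1 : List Int) (li2 : List Int) (out : List Int) : Prop := out = finalanswer_alt li1 li2
instance (li1 : List Int) (li2 : List Int) (out : List Int) : Decidable (Spec_finalanswer li1 li2 out) := by unfold Spec_finalanswer; infer_instance

-- ===== CLAIM (what is proved, stated in full; the proofs are below) =====
def Claim_equal_finalanswer : Prop := ∀ (li1 : List Int) (li2 : List Int), Dom_finalanswer li1 li2 → Spec_finalanswer li1 li2 (finalanswer li1 li2)

-- ===== LEMMAS AND PROOFS =====

-- the loop invariant: if c is the cut point (arr[j] < x ↔ j < c) and lo ≤ c ≤ hi ≤ len, the search returns c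
theorem pvBlAux_eq_cut (arr : List Int) (x : Int) (c : Nat)
    (hc : ∀ j (hj : j < arr.length), arr[j] < x ↔ j < c) :
    ∀ lo hi, lo ≤ c → c ≤ hi → hi ≤ arr.length → pvBlAux arr x lo hi = c := by
  intro lo hi
  induction lo, hi using pvBlAux.induct arr x with
  | case1 lo hi h mid hlt ih =>
    intro h1 h2 h3
    rw [pvBlAux]
    simp only [h, dite_true]
    have hmid : mid < arr.length := by omega
    have : arr.getD mid 0 = arr[mid] := List.getD_eq_getElem arr 0 hmid
    rw [show (lo + hi) / 2 = mid from rfl, this]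
    rw [this] at hlt
    simp only [hlt, if_true]
    exact ih ((hc mid hmid).mp hlt) h2 h3
  | case2 lo hi h mid hge ih =>
    intro h1 h2 h3
    rw [pvBlAux]
    simp only [h, dite_true]
    have hmid : mid < arr.length := by omega
    have : arr.getD mid 0 = arr[mid] := List.getD_eq_getElem arr 0 hmid
    rw [show (lo + hi) / 2 = mid from rfl, this]
    rw [this] at hge
    simp only [hge, if_false]
    have : c ≤ mid := by
      by_contra hlt
      exact hge ((hc mid hmid).mpr (by omega))
    exact ih h1 this (by omega)
  | case3 lo hi h =>
    intro h1 h2 h3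
    rw [pvBlAux]
    simp only [h, dite_false]
    omega

-- a sorted list has a cut point for every x
theorem sorted_cut (arr : List Int) (hs : arr.Pairwise (· ≤ ·)) (x : Int) :
    ∃ c, c ≤ arr.length ∧ ∀ j (hj : j < arr.length), arr[j] < x ↔ j < c := by
  induction arr with
  | nil => exact ⟨0, by simp, by simp⟩
  | cons a t ih =>
    obtain ⟨ha, ht⟩ := List.pairwise_cons.mp hs
    obtain ⟨c, hcl, hc⟩ := ih ht
    by_cases hax : a < x
    · refine ⟨c + 1, by simpa using hcl, ?_⟩
      intro j hj
      cases j with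
      | zero => simpa using hax
      | succ j =>
        have hj' : j < t.length := by simpa using hj
        simpa using (hc j hj')
    · refine ⟨0, by omega, ?_⟩
      intro j hj
      cases j with
      | zero => simpa using hax
      | succ j =>
        have hj' : j < t.length := by simpa using hj
        have : a ≤ t[j] := ha _ (t.getElem_mem hj')
        simp only [List.getElem_cons_succ]
        constructor
        · intro h; omega
        · intro h; omega

-- membership in a sorted list ↔ the binary search hits x
theorem mem_iff_bisect (arr : List Int) (hs : arr.Pairwise (· ≤ ·)) (x : Int) :
    x ∈ arr ↔ (pvBisectLeft arr x < arr.length ∧ arr.getD (pvBisectLeft arr x) 0 = x) := by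
  obtain ⟨c, hcl, hc⟩ := sorted_cut arr hs x
  have hbl : pvBisectLeft arr x = c :=
    pvBlAux_eq_cut arr x c hc 0 arr.length (by omega) hcl le_rfl
  rw [hbl]
  constructor
  · intro hx
    obtain ⟨j, hj, hjx⟩ := List.getElem_of_mem hx
    have hcj : c ≤ j := by
      by_contra h
      have := (hc j hj).mpr (by omega)
      omega
    have hcl' : c < arr.length := by omega
    refine ⟨hcl', ?_⟩
    rw [List.getD_eq_getElem arr 0 hcl']
    have h1 : ¬ arr[c] < x := fun h => by
      have := (hc c hcl').mp h; omega
    have h2 : arr[c] ≤ arr[j] := by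
      rcases Nat.eq_or_lt_of_le hcj with h | h
      · simp [h]
      · exact (List.pairwise_iff_getElem.mp hs) c j hcl' hj h
    omega
  · rintro ⟨hlt, hget⟩
    rw [List.getD_eq_getElem arr 0 hlt] at hget
    exact hget ▸ arr.getElem_mem hlt

-- per-element agreement of the two loop bodies
theorem elem_agree (li1 : List Int) (item : Int) :
    (if item ∈ PySem.Set.ofList li1 then (1 : Int) else 0) =
    (let arr := PySem.List.sorted li1 (fun v => v) false
     let i := pvBisectLeft arr item
     if i < arr.length ∧ arr.getD i 0 = item then (1 : Int) else 0) := by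
  have hs : (PySem.List.sorted li1 (fun v => v) false).Pairwise (· ≤ ·) :=
    PySem.List.sorted_pairwise li1 (fun v => v)
  have h1 : item ∈ PySem.Set.ofList li1 ↔ item ∈ li1 := PySem.Set.mem_ofList li1 item
  have h2 : item ∈ PySem.List.sorted li1 (fun v => v) false ↔ item ∈ li1 :=
    PySem.List.mem_sorted li1 (fun v => v) false item
  have h3 := mem_iff_bisect (PySem.List.sorted li1 (fun v => v) false) hs item
  simp only []
  by_cases h : item ∈ li1
  · rw [if_pos (h1.mpr h), if_pos (h3.mp (h2.mpr h))]
  · rw [if_neg (fun hx => h (h1.mp hx)),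
        if_neg (fun hx => h (h2.mp (h3.mpr hx)))]

-- ===== VERDICT (by name: the statement is the Claim_ definition above) =====
theorem finalanswer_spec : Claim_equal_finalanswer := by
  intro li1 li2 _
  unfold Spec_finalanswer finalanswer finalanswer_alt
  rw [PySem.List.foldl_append_singleton_eq_map, PySem.List.foldl_append_singleton_eq_map]
  exact List.map_congr_left (fun item _ => elem_agree li1 item)
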